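-- pv_equiv track=rewrite | github.com/Mohamed-Nasser-Massoud/CSP-Timetable | Intellgent system projects/CSP Timetable/constraints.py | no_room_conflict
-- ===== SOURCE A (Python) =====
-- from typing import Dict, Tuple, List
--
-- def no_room_conflict(assignment: Dict[str, Tuple[str, str, str]]) -> bool:
--     """
--     HARD CONSTRAINT 2: No room hosts two classes at same time
--
--     Args:
--         assignment: Current variable assignments
--
--     Returns:
--         True if no room conflicts, False otherwise
--     """
--     # Group by room and timeslot
--     room_schedule = {}
--
--     for var_name, (timeslot, room, instructor) in assignment.items():
--         key = (room, timeslot)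
--         if key not in room_schedule:
--             room_schedule[key] = []
--         room_schedule[key].append(var_name)
--
--     # Check for conflicts
--     for (room, timeslot), lectures in room_schedule.items():
--         if len(lectures) > 1:
--             # Conflict found!
--             return False
--
--     return True
-- ===== SOURCE B (Python) =====
-- def no_room_conflict(assignment):
--     """Single pass: track (room, timeslot) keys already seen; fail on first repeat."""
--     seen = set()
--     for var_name, (timeslot, room, instructor) in assignment.items():
--         key = (room, timeslot)
--         if key in seen:
--             return False
--         seen.add(key)
--     return True
-- ===== Notes on version B (the rewrite author's own statement) =====
-- stated objective: simpler
-- what changed: Replaces the build-a-dict-of-lists pass plus a second scan over its values with a single early-exiting pass that maintains a set of (room, timeslot) keys and returns False at the first repeated key.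
import Mathlib
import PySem

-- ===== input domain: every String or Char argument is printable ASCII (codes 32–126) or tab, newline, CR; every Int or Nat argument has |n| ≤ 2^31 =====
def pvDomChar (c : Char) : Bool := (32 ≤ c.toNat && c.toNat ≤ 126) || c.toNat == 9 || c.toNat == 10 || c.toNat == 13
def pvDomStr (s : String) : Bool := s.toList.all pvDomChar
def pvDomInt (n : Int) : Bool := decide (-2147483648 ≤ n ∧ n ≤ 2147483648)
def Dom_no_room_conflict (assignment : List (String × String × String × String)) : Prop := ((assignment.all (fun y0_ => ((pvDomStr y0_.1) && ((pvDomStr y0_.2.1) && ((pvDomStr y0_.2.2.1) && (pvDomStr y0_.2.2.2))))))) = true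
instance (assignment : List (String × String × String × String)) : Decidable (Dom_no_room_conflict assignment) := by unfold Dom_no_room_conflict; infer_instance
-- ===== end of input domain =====

-- B replaces A's dict-of-lists build plus second scan by one early-exiting pass over a set of
-- (room, timeslot) keys (objective: simpler; same O(n) cost).

-- ===== PORT A =====
-- literal port of A: group var_names by (room, timeslot) in a dict, then scan for a list of length > 1
def no_room_conflict (assignment : List (String × String × String × String)) : Bool :=
  let room_schedule : PySem.Dict (String × String) (List String) :=
    (PySem.Dict.ofList assignment).items.foldl
      (fun d p =>
        let key := (p.2.2.1, p.2.1)
        let d' := if d.contains key then d else d.insert key []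
        d'.modify key [] (fun l => l ++ [p.1]))
      PySem.Dict.empty
  room_schedule.items.all (fun kv => !(decide (1 < kv.2.length)))

-- ===== PORT B =====
-- B's loop: early return False on the first repeated (room, timeslot) key
def altGo (seen : PySem.Set (String × String)) :
    List (String × String × String × String) → Bool
  | [] => true
  | p :: rest =>
    let key := (p.2.2.1, p.2.1)
    if PySem.Set.contains seen key then false
    else altGo (PySem.Set.add seen key) rest

def no_room_conflict_alt (assignment : List (String × String × String × String)) : Bool :=
  altGo PySem.Set.empty (PySem.Dict.ofList assignment).items

-- ===== PRECONDITION & SPEC =====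
def Spec_no_room_conflict (assignment : List (String × String × String × String)) (out : Bool) : Prop := out = no_room_conflict_alt assignment
instance (assignment : List (String × String × String × String)) (out : Bool) : Decidable (Spec_no_room_conflict assignment out) := by unfold Spec_no_room_conflict; infer_instance

-- ===== CLAIM (what is proved, stated in full; the proofs are below) =====
def Claim_equal_no_room_conflict : Prop := ∀ (assignment : List (String × String × String × String)), Dom_no_room_conflict assignment → Spec_no_room_conflict assignment (no_room_conflict assignment)

-- ===== LEMMAS AND PROOFS =====

-- the (room, timeslot) key of one item
def pvKey (p : String × String × String × String) : String × String := (p.2.2.1, p.2.1)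

-- A's loop body, named for the proofs (definitionally the lambda in the port)
def stepA (d : PySem.Dict (String × String) (List String))
    (p : String × String × String × String) : PySem.Dict (String × String) (List String) :=
  let key := (p.2.2.1, p.2.1)
  let d' := if d.contains key then d else d.insert key []
  d'.modify key [] (fun l => l ++ [p.1])

lemma getD_stepA (d : PySem.Dict (String × String) (List String))
    (p : String × String × String × String) (k : String × String) :
    (stepA d p).getD k [] =
      if k = pvKey p then d.getD (pvKey p) [] ++ [p.1] else d.getD k [] := by
  unfold stepA pvKey
  by_cases hc : d.contains (p.2.2.1, p.2.1) = true
  · simp [hc, PySem.Dict.getD_modify]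
  · simp only [Bool.not_eq_true] at hc
    simp only [hc, Bool.false_eq_true, if_false, PySem.Dict.getD_modify, PySem.Dict.getD_insert,
      PySem.Dict.getD_of_not_contains d ([] : List String) hc]
    split_ifs <;> simp_all

lemma keys_stepA (d : PySem.Dict (String × String) (List String))
    (p : String × String × String × String) :
    (stepA d p).keys =
      if d.contains (pvKey p) then d.keys else d.keys ++ [pvKey p] := by
  unfold stepA pvKey
  by_cases hc : d.contains (p.2.2.1, p.2.1) = true
  · simp only [hc, if_true]
    rw [PySem.Dict.keys_modify, PySem.Dict.keys_insert_of_contains _ _ hc]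
  · simp only [Bool.not_eq_true] at hc
    simp only [hc, Bool.false_eq_true, if_false]
    rw [PySem.Dict.keys_modify,
      PySem.Dict.keys_insert_of_contains _ _ (PySem.Dict.contains_insert_self d _ _),
      PySem.Dict.keys_insert_of_not_contains d _ hc]

lemma foldA_getD (l : List (String × String × String × String))
    (d : PySem.Dict (String × String) (List String)) (k : String × String) :
    ((l.foldl stepA d).getD k []).length = (d.getD k []).length + (l.map pvKey).count k := by
  induction l generalizing d with
  | nil => simp
  | cons p t ih =>
    simp only [List.foldl_cons, List.map_cons]
    rw [ih, getD_stepA]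
    by_cases hk : k = pvKey p
    · subst hk; simp; omega
    · simp [hk, Ne.symm hk]

lemma foldA_mem_keys (l : List (String × String × String × String))
    (d : PySem.Dict (String × String) (List String)) (k : String × String) :
    k ∈ (l.foldl stepA d).keys ↔ k ∈ d.keys ∨ k ∈ l.map pvKey := by
  induction l generalizing d with
  | nil => simp
  | cons p t ih =>
    simp only [List.foldl_cons, List.map_cons, List.mem_cons]
    rw [ih, keys_stepA]
    by_cases hc : d.contains (pvKey p) = true
    · have hm : pvKey p ∈ d.keys := (PySem.Dict.contains_iff_mem_keys d (pvKey p)).mp hc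
      simp only [hc, if_true]
      constructor
      · rintro (h | h) <;> tauto
      · rintro (h | h | h)
        · tauto
        · subst h; tauto
        · tauto
    · simp only [hc, Bool.false_eq_true, if_false, List.mem_append, List.mem_singleton]
      tauto

lemma foldA_keys_nodup (l : List (String × String × String × String))
    (d : PySem.Dict (String × String) (List String)) (h : d.keys.Nodup) :
    (l.foldl stepA d).keys.Nodup := by
  induction l generalizing d with
  | nil => exact h
  | cons p t ih =>
    simp only [List.foldl_cons]
    refine ih _ ?_
    rw [keys_stepA]
    by_cases hc : d.contains (pvKey p) = true
    · simpa [hc] using h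
    · rw [if_neg hc]
      have hm : pvKey p ∉ d.keys := fun hmem =>
        (by simpa [hc] using (PySem.Dict.contains_iff_mem_keys d (pvKey p)).mpr hmem)
      rw [List.nodup_append]
      refine ⟨h, List.nodup_singleton _, ?_⟩
      intro a ha b hb
      rw [List.mem_singleton] at hb
      subst hb
      exact fun e => hm (e ▸ ha)

-- A's result on a generic items list: true iff the key list has no duplicate
lemma A_char (l : List (String × String × String × String)) :
    ((l.foldl stepA PySem.Dict.empty).items.all (fun kv => !(decide (1 < kv.2.length))) = true)
      ↔ (l.map pvKey).Nodup := by
  have hnd : (l.foldl stepA PySem.Dict.empty).keys.Nodup :=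
    foldA_keys_nodup l _ PySem.Dict.nodup_keys_empty
  rw [List.all_eq_true, List.nodup_iff_count_le_one]
  constructor
  · intro h a
    by_cases hm : a ∈ (l.foldl stepA PySem.Dict.empty).keys
    · simp only [PySem.Dict.keys, List.mem_map] at hm
      obtain ⟨kv, hkv, hfst⟩ := hm
      have hgd : (l.foldl stepA PySem.Dict.empty).getD a [] = kv.2 := by
        have : (a, kv.2) ∈ (l.foldl stepA PySem.Dict.empty).items := by
          rwa [← hfst]
        exact PySem.Dict.getD_of_mem_items _ this hnd []
      have hlen := foldA_getD l PySem.Dict.empty a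
      rw [hgd] at hlen
      have := h kv hkv
      simp only [Bool.not_eq_eq_eq_not, Bool.not_true, decide_eq_false_iff_not, not_lt] at this
      simp [PySem.Dict.getD_empty] at hlen
      omega
    · have : a ∉ l.map pvKey := fun hin =>
        hm ((foldA_mem_keys l PySem.Dict.empty a).mpr (Or.inr hin))
      simp [List.count_eq_zero_of_not_mem this]
  · intro h kv hkv
    have hmem : kv.1 ∈ (l.foldl stepA PySem.Dict.empty).keys := by
      simp only [PySem.Dict.keys, List.mem_map]
      exact ⟨kv, hkv, rfl⟩
    have hgd : (l.foldl stepA PySem.Dict.empty).getD kv.1 [] = kv.2 := by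
      have : (kv.1, kv.2) ∈ (l.foldl stepA PySem.Dict.empty).items := by simpa using hkv
      exact PySem.Dict.getD_of_mem_items _ this hnd []
    have hlen := foldA_getD l PySem.Dict.empty kv.1
    rw [hgd] at hlen
    have := h kv.1
    simp only [Bool.not_eq_eq_eq_not, Bool.not_true, decide_eq_false_iff_not, not_lt]
    simp [PySem.Dict.getD_empty] at hlen
    omega

-- B's loop: true iff the remaining keys are duplicate-free and disjoint from `seen`
lemma altGo_char (l : List (String × String × String × String))
    (seen : PySem.Set (String × String)) :
    altGo seen l = true ↔ (l.map pvKey).Nodup ∧ ∀ k ∈ l.map pvKey, k ∉ seen := by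
  induction l generalizing seen with
  | nil => simp [altGo]
  | cons p t ih =>
    have hkey : pvKey p = (p.2.2.1, p.2.1) := rfl
    by_cases hc : PySem.Set.contains seen (pvKey p) = true
    · have hm : pvKey p ∈ seen := (PySem.Set.contains_iff seen (pvKey p)).mp hc
      rw [show altGo seen (p :: t)
            = if PySem.Set.contains seen (pvKey p) then false
              else altGo (PySem.Set.add seen (pvKey p)) t from rfl, if_pos hc]
      constructor
      · intro h; cases h
      · rintro ⟨-, hdisj⟩
        exact absurd hm (hdisj (pvKey p) (List.mem_map_of_mem List.mem_cons_self))
    · have hm : pvKey p ∉ seen := fun hmem =>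
        hc ((PySem.Set.contains_iff seen (pvKey p)).mpr hmem)
      rw [show altGo seen (p :: t)
            = if PySem.Set.contains seen (pvKey p) then false
              else altGo (PySem.Set.add seen (pvKey p)) t from rfl, if_neg hc]
      rw [ih, List.map_cons, List.nodup_cons, PySem.Set.add_of_not_mem hm]
      constructor
      · rintro ⟨hnd, hdisj⟩
        refine ⟨⟨fun hin => (hdisj _ hin) (List.mem_append.mpr (Or.inr (by simp))), hnd⟩, ?_⟩
        intro k hk
        rcases List.mem_cons.mp hk with h1 | h1
        · exact h1 ▸ hm
        · exact fun hs => (hdisj k h1) (List.mem_append.mpr (Or.inl hs))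
      · rintro ⟨⟨hnotin, hnd⟩, hdisj⟩
        refine ⟨hnd, fun k hk hks => ?_⟩
        rcases List.mem_append.mp hks with h1 | h1
        · exact (hdisj k (List.mem_cons.mpr (Or.inr hk))) h1
        · have hkk : k = pvKey p := by simpa using h1
          exact hnotin (hkk ▸ hk)

-- ===== VERDICT (by name: the statement is the Claim_ definition above) =====
theorem no_room_conflict_spec : Claim_equal_no_room_conflict := by
  intro assignment _
  unfold Spec_no_room_conflict no_room_conflict no_room_conflict_alt
  rw [Bool.eq_iff_iff]
  have hA := A_char (PySem.Dict.ofList assignment).items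
  have hB := altGo_char (PySem.Dict.ofList assignment).items PySem.Set.empty
  constructor
  · intro h
    rw [hB]
    exact ⟨hA.mp h, by intro k _ hk; cases hk⟩
  · intro h
    exact hA.mpr ((hB.mp h).1)
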